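-- pv_equiv track=rewrite | github.com/daniltirsk/Zero-Shot-NER-with-extractive-question-answering | qanerUtils.py | bioToSquad
-- ===== SOURCE A (Python) =====
-- from collections import Counter
-- from typing import List, Tuple, Optional, Dict
--
-- def bioToSquad(tokens: List[str], mapper: Dict, labels: Optional[List[str]] = None) -> List:
--     """
--     converts bio labeled text into single span squad format
--
--     Args:
--         tokens: List of tokens
--         mapper: Dict of entity:question pairs
--         labels: List of entities, corresponding to tokens
--
--     Returns:
--       A list of ((context, question),(answer_text,answer_start),entity_type)
--   """
--
--     context = " ".join(tokens)
--     possible_entities = list(mapper.keys())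
--     answers_dict = {}
--     squad = []
--
--     if labels:
--         counts = Counter([label for label in labels if label.startswith('B')])
--         banned_entities = [i[0][2:] for i in counts.items() if i[1] > 1]
--
--         for i in range(len(labels)):
--             token = tokens[i]
--             label = labels[i]
--             entity = label[2:]
--
--             if label == "O" or entity in banned_entities:
--                 continue
--
--             if entity not in answers_dict:
--                 answers_dict[entity] = [[], []]
--
--             if label.startswith("B-"):
--                 answers_dict[entity][0].append(token)
--                 if i > 0:
--                     answers_dict[entity][1].append(len(" ".join(tokens[:i])) + 1)
--                 else:
--                     answers_dict[entity][1].append(len(" ".join(tokens[:i])))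
--             elif label.startswith("I-"):
--                 answers_dict[entity][0][-1] = f"{answers_dict[entity][0][-1]} {token}"
--
--         for item in answers_dict.items():
--             entity = item[0]
--             if entity in possible_entities:
--                 possible_entities.remove(entity)
--
--             if entity in mapper:
--                 question = mapper[entity]
--                 answer_text, answer_start = item[1]
--                 new_entry = ((context, question), (tuple(answer_text), tuple(answer_start)), entity)
--                 squad.append(new_entry)
--
--     for neg_entity in possible_entities:
--         question = mapper[neg_entity]
--         answer = (("",), (-1,))
--         new_entry = ((context, question), answer, neg_entity)
--         squad.append(new_entry)
--
--     return squad
-- ===== SOURCE B (Python) =====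
-- from collections import Counter
-- from typing import List, Optional, Dict
--
--
-- def bioToSquad(tokens: List[str], mapper: Dict, labels: Optional[List[str]] = None) -> List:
--     """Single forward pass with a running character offset (prefix sums) instead of
--     re-joining tokens[:i] at every B- label; answer texts are collected as token
--     sublists and joined once at emission."""
--     context = " ".join(tokens)
--     seen = {}
--
--     if labels:
--         counts = Counter([label for label in labels if label.startswith('B')])
--         banned_entities = {i[0][2:] for i in counts.items() if i[1] > 1}
--
--         offset = 0
--         for token, label in zip(tokens, labels):
--             entity = label[2:]
--             if label != "O" and entity not in banned_entities:
--                 if entity not in seen: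
--                     seen[entity] = ([], [])
--                 if label.startswith("B-"):
--                     seen[entity][0].append([token])
--                     seen[entity][1].append(offset)
--                 elif label.startswith("I-"):
--                     seen[entity][0][-1].append(token)
--             offset += len(token) + 1
--
--     squad = [((context, mapper[e]), (tuple(" ".join(ts) for ts in tss), tuple(ss)), e)
--              for e, (tss, ss) in seen.items() if e in mapper]
--     squad += [((context, mapper[e]), (("",), (-1,)), e)
--               for e in mapper if e not in seen]
--     return squad
-- ===== Notes on version B (the rewrite author's own statement) =====
-- stated objective: alternative
-- what changed: Replaces the per-B-label recomputation of len(' '.join(tokens[:i])) with a single running character-offset (prefix sum) carried through one zip pass, collects each answer's tokens as a sublist joined once at emission instead of repeated f-string concatenation, and emits results by comprehensions filtering mapper's keys by dict membership instead of a fold that mutates possible_entities via list.remove.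
import Mathlib
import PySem

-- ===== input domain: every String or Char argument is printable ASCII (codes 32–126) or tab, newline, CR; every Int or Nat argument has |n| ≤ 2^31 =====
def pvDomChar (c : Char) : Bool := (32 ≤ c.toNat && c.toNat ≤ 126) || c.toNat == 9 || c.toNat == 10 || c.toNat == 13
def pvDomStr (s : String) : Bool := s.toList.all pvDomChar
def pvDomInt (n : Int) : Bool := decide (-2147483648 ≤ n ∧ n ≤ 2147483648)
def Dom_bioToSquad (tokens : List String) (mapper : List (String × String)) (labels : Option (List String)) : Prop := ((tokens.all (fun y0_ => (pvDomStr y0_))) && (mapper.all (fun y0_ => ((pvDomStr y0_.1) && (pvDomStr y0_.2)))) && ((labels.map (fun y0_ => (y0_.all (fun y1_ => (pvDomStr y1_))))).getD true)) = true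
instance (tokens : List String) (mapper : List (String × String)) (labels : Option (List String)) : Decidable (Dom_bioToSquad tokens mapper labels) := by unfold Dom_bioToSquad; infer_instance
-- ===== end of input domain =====

-- B replaces A's re-joining of tokens[:i] for each answer_start by a single running
-- character-offset (prefix sum) carried through one zip pass, collects answer texts as token
-- sublists joined once at emission, and builds the output by filter/map over the dict
-- instead of A's fold that mutates the possible-entities list.

-- ===== PORT A =====

-- xs[-1] = <old last> ⊔ tok  (Python raises IndexError on [], which Pre_ excludes; the [] case
-- is a guard for totality only)
def pvSetLast (xs : List String) (tok : String) : List String :=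
  if xs.isEmpty then xs
  else xs.dropLast ++ [PySem.Str.join " " [xs.getLastD "", tok]]

-- counts = Counter([label for label in labels if label.startswith('B')]);
-- banned_entities = [i[0][2:] for i in counts.items() if i[1] > 1]   (A's list form)
def pvBanned (l : List String) : List String :=
  ((PySem.Dict.counter (l.filter (fun lab => PySem.Str.startswith lab "B"))).items.filter
      (fun p => decide (1 < p.2))).map (fun p => PySem.Str.slice p.1 (some 2) none)

-- body of A's `for i in range(len(labels))` loop, state = answers_dict
def pvStepA (tokens l banned : List String)
    (ad : PySem.Dict String (List String × List Int)) (i : Int) :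
    PySem.Dict String (List String × List Int) :=
  let token := PySem.List.pyGetD tokens i ""
  let label := PySem.List.pyGetD l i ""
  let entity := PySem.Str.slice label (some 2) none
  if label == "O" || banned.contains entity then ad
  else
    let ad1 := if ad.contains entity then ad else ad.insert entity ([], [])
    if PySem.Str.startswith label "B-" then
      let start : Int :=
        if 0 < i then PySem.Str.len (PySem.Str.join " " (PySem.List.slice tokens none (some i))) + 1
        else PySem.Str.len (PySem.Str.join " " (PySem.List.slice tokens none (some i)))
      ad1.modify entity ([], []) (fun p => (p.1 ++ [token], p.2 ++ [start]))
    else if PySem.Str.startswith label "I-" then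
      ad1.modify entity ([], []) (fun p => (pvSetLast p.1 token, p.2))
    else ad1

def bioToSquad (tokens : List String) (mapper : List (String × String)) (labels : Option (List String)) : List ((String × String) × (List String × List Int) × String) :=
  let context := PySem.Str.join " " tokens
  let m := PySem.Dict.ofList mapper
  let res :=
    match labels with
    | none => (m.keys, ([] : List ((String × String) × (List String × List Int) × String)))
    | some l =>
      if l.isEmpty then (m.keys, [])
      else
        let banned := pvBanned l
        let ad := (PySem.List.pyRange 0 (l.length : Int) 1).foldl (pvStepA tokens l banned) PySem.Dict.empty
        ad.items.foldl (fun st (item : String × (List String × List Int)) =>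
            (if st.1.contains item.1 then (PySem.List.remove? st.1 item.1).getD st.1 else st.1,
             if m.contains item.1 then
               st.2 ++ [((context, m.getD item.1 ""), (item.2.1, item.2.2), item.1)]
             else st.2))
          (m.keys, [])
  res.1.foldl (fun squad ne => squad ++ [((context, m.getD ne ""), ([""], [-1]), ne)]) res.2

-- ===== PORT B =====

-- B's banned_entities is a SET comprehension over the same Counter items
def pvBannedSet (l : List String) : PySem.Set String :=
  PySem.Set.ofList (pvBanned l)

-- xss[-1].append(tok) (IndexError on [] is excluded by Pre_; the [] case is a totality guard)
def pvAppendLast (xss : List (List String)) (tok : String) : List (List String) :=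
  if xss.isEmpty then xss else xss.dropLast ++ [xss.getLastD [] ++ [tok]]

-- body of B's `for token, label in zip(tokens, labels)` loop, state = (seen, offset);
-- B's seen stores each answer as the LIST of its tokens (joined once at emission)
def pvStepB (banned : List String)
    (st : PySem.Dict String (List (List String) × List Int) × Int) (p : String × String) :
    PySem.Dict String (List (List String) × List Int) × Int :=
  let entity := PySem.Str.slice p.2 (some 2) none
  let seen :=
    if !(p.2 == "O") && !(banned.contains entity) then
      let s1 := if st.1.contains entity then st.1 else st.1.insert entity ([], [])
      if PySem.Str.startswith p.2 "B-" then
        s1.modify entity ([], []) (fun q => (q.1 ++ [[p.1]], q.2 ++ [st.2]))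
      else if PySem.Str.startswith p.2 "I-" then
        s1.modify entity ([], []) (fun q => (pvAppendLast q.1 p.1, q.2))
      else s1
    else st.1
  (seen, st.2 + PySem.Str.len p.1 + 1)

def bioToSquad_alt (tokens : List String) (mapper : List (String × String)) (labels : Option (List String)) : List ((String × String) × (List String × List Int) × String) :=
  let context := PySem.Str.join " " tokens
  let m := PySem.Dict.ofList mapper
  let seen :=
    match labels with
    | none => (PySem.Dict.empty : PySem.Dict String (List (List String) × List Int))
    | some l =>
      if l.isEmpty then PySem.Dict.empty
      else ((tokens.zip l).foldl (pvStepB (pvBannedSet l)) (PySem.Dict.empty, 0)).1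
  let squad := (seen.items.filter (fun p => m.contains p.1)).map
      (fun p => ((context, m.getD p.1 ""), (p.2.1.map (PySem.Str.join " "), p.2.2), p.1))
  squad ++ (m.keys.filter (fun k => !(seen.contains k))).map
      (fun k => ((context, m.getD k ""), ([""], [-1]), k))

-- ===== PRECONDITION & SPEC =====
-- Pre_ excludes exactly the inputs where A raises IndexError: labels longer than tokens, and an
-- "I-"-label whose entity is neither banned (two B- occurrences) nor opened by an earlier "B-"
-- label of the same entity (Python's `answers_dict[entity][0][-1]` on an empty list).
def Pre_bioToSquad (tokens : List String) (mapper : List (String × String)) (labels : Option (List String)) : Prop :=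
  (labels.getD []).length ≤ tokens.length ∧
  ∀ i, i < (labels.getD []).length →
    PySem.Str.startswith ((labels.getD []).getD i "") "I-" = true →
    ((labels.getD []).any (fun lab =>
        PySem.Str.startswith lab "B" && decide (2 ≤ (labels.getD []).count lab) &&
        (PySem.Str.slice lab (some 2) none == PySem.Str.slice ((labels.getD []).getD i "") (some 2) none))) = true
    ∨ (((labels.getD []).take i).any (fun lab =>
        PySem.Str.startswith lab "B-" &&
        (PySem.Str.slice lab (some 2) none == PySem.Str.slice ((labels.getD []).getD i "") (some 2) none))) = true
instance (tokens : List String) (mapper : List (String × String)) (labels : Option (List String)) : Decidable (Pre_bioToSquad tokens mapper labels) := by unfold Pre_bioToSquad; infer_instance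

def pvWitness_bioToSquad : List String × (List (String × String)) × Option (List String) :=
  (["a", "bb", "c"], ([("x", "qx"), ("y", "qy")], some ["B-x", "I-x", "B-y"]))

def Spec_bioToSquad (tokens : List String) (mapper : List (String × String)) (labels : Option (List String)) (out : List ((String × String) × (List String × List Int) × String)) : Prop := out = bioToSquad_alt tokens mapper labels
instance (tokens : List String) (mapper : List (String × String)) (labels : Option (List String)) (out : List ((String × String) × (List String × List Int) × String)) : Decidable (Spec_bioToSquad tokens mapper labels out) := by unfold Spec_bioToSquad; infer_instance

-- ===== CLAIM (what is proved, stated in full; the proofs are below) =====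
def Claim_equal_bioToSquad : Prop := ∀ (tokens : List String) (mapper : List (String × String)) (labels : Option (List String)), Dom_bioToSquad tokens mapper labels → Pre_bioToSquad tokens mapper labels → Spec_bioToSquad tokens mapper labels (bioToSquad tokens mapper labels)

-- ===== LEMMAS AND PROOFS =====

theorem pvSumCast (rs : List String) :
    (rs.map (fun c => ((([' '].length + c.toList.length : Nat)) : Int))).sum
      = (rs.map (fun t => PySem.Str.len t + 1)).sum := by
  induction rs with
  | nil => simp
  | cons r t ih =>
      simp only [List.map_cons, List.sum_cons, PySem.Str.len_eq]
      rw [ih]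
      push_cast
      simp only [PySem.Str.len_eq, List.length_cons, List.length_nil]
      push_cast
      ring

-- running offset after i tokens: Σ_{j<i} (len tokens[j] + 1)  (proof-only helper)
def pvS (tokens : List String) (i : Nat) : Int :=
  ((tokens.take i).map (fun t => PySem.Str.len t + 1)).sum

theorem pvJoinLenChars (sep cs : List Char) (css : List (List Char)) :
    (PySem.Chars.join sep (cs :: css)).length
      = cs.length + (css.map (fun c => sep.length + c.length)).sum := by
  induction css generalizing cs with
  | nil => simp [PySem.Chars.join_singleton]
  | cons c2 rest ih =>
      rw [PySem.Chars.join_cons_cons]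
      simp only [List.length_append, ih c2, List.map_cons, List.sum_cons]
      omega

theorem pvJoinLen (ts : List String) (h : ts ≠ []) :
    PySem.Str.len (PySem.Str.join " " ts) + 1
      = ((ts.map (fun t => PySem.Str.len t + 1)).sum : Int) := by
  cases ts with
  | nil => exact absurd rfl h
  | cons t rest =>
    have hlen : (PySem.Str.join " " (t :: rest)).toList.length
        = t.toList.length + ((rest.map String.toList).map (fun c => (" ".toList.length) + c.length)).sum := by
      rw [PySem.Str.toList_join]
      simpa using pvJoinLenChars " ".toList t.toList (rest.map String.toList)
    simp only [PySem.Str.len_eq, hlen, List.map_map]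
    push_cast
    rw [List.map_map]
    simp only [Function.comp_def, List.map_cons, List.sum_cons]
    rw [pvSumCast rest]
    simp only [PySem.Str.len_eq]
    ring

theorem pvS_succ (tokens : List String) (i : Nat) (h : i < tokens.length) :
    pvS tokens (i + 1) = pvS tokens i + PySem.Str.len tokens[i] + 1 := by
  unfold pvS
  rw [List.take_succ, List.getElem?_eq_getElem h]
  simp only [Option.toList_some, List.map_append, List.sum_append, List.map_cons, List.map_nil,
    List.sum_cons, List.sum_nil]
  ring

theorem pvStart_eq (tokens : List String) (i : Nat) (h : i ≤ tokens.length) :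
    (if 0 < (i : Int) then
        PySem.Str.len (PySem.Str.join " " (PySem.List.slice tokens none (some (i : Int)))) + 1
      else PySem.Str.len (PySem.Str.join " " (PySem.List.slice tokens none (some (i : Int)))))
      = pvS tokens i := by
  rw [PySem.List.slice_to_natCast]
  rcases Nat.eq_zero_or_pos i with h0 | h0
  · subst h0
    simp [pvS, PySem.Str.len_eq, PySem.Str.toList_join, PySem.Chars.join_nil]
  · have hne : tokens.take i ≠ [] := by
      intro hc
      rcases List.take_eq_nil_iff.mp hc with h1 | h1
      · omega
      · subst h1; simp at h; omega
    rw [if_pos (by exact_mod_cast h0)]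
    simpa [pvS] using pvJoinLen (tokens.take i) hne

-- value map from B's token-sublists representation to A's joined-strings representation
def pvJoinVal (q : List (List String) × List Int) : List String × List Int :=
  (q.1.map (PySem.Str.join " "), q.2)

def pvG (p : String × (List (List String) × List Int)) : String × (List String × List Int) :=
  (p.1, pvJoinVal p.2)

theorem pvJoinSingleton (t : String) : PySem.Str.join " " [t] = t := by
  apply String.toList_inj.mp
  rw [PySem.Str.toList_join]
  simp [PySem.Chars.join_singleton]

theorem pvChJoinAppend (sep : List Char) (css : List (List Char)) (c : List Char) (h : css ≠ []) :
    PySem.Chars.join sep (css ++ [c]) = PySem.Chars.join sep css ++ sep ++ c := by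
  induction css with
  | nil => exact absurd rfl h
  | cons c2 rest ih =>
      cases rest with
      | nil => simp [PySem.Chars.join_cons_cons, PySem.Chars.join_singleton]
      | cons c3 rest2 =>
          simp only [List.cons_append] at ih ⊢
          rw [PySem.Chars.join_cons_cons sep c2 c3 (rest2 ++ [c]), ih (by simp),
            PySem.Chars.join_cons_cons]
          simp [List.append_assoc]

theorem pvJoinConcat (z : List String) (tok : String) (hz : z ≠ []) :
    PySem.Str.join " " (z ++ [tok])
      = PySem.Str.join " " [PySem.Str.join " " z, tok] := by
  apply String.toList_inj.mp
  rw [PySem.Str.toList_join, PySem.Str.toList_join]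
  simp only [List.map_append, List.map_cons, List.map_nil]
  rw [pvChJoinAppend _ _ _ (by simpa using hz)]
  rw [PySem.Str.toList_join]
  rw [PySem.Chars.join_cons_cons, PySem.Chars.join_singleton]

theorem pvAppendCompat (xss : List (List String)) (tok : String) (h : [] ∉ xss) :
    (pvAppendLast xss tok).map (PySem.Str.join " ")
      = pvSetLast (xss.map (PySem.Str.join " ")) tok := by
  unfold pvAppendLast pvSetLast
  rcases List.eq_nil_or_concat xss with hx | ⟨ys, z, hx⟩
  · subst hx; simp
  · subst hx
    have hz : z ≠ [] := by
      intro hz; exact h (by simp [List.concat_eq_append, hz])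
    simp only [List.concat_eq_append]
    rw [if_neg (by simp), if_neg (by simp)]
    simp only [List.map_append, List.map_cons, List.map_nil, List.dropLast_concat,
      List.getLastD_concat, pvJoinConcat z tok hz]

-- relation lemmas between A's dict and B's dict (A items = B items mapped through pvG)
theorem pvRelContains (d : PySem.Dict String (List String × List Int))
    (s : PySem.Dict String (List (List String) × List Int))
    (hR : d.items = s.items.map pvG) (e : String) : d.contains e = s.contains e := by
  show d.items.any _ = s.items.any _
  rw [hR, List.any_map]
  rfl

theorem pvRelGetD (d : PySem.Dict String (List String × List Int))
    (s : PySem.Dict String (List (List String) × List Int))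
    (hR : d.items = s.items.map pvG) (e : String) :
    d.getD e ([], []) = pvJoinVal (s.getD e ([], [])) := by
  unfold PySem.Dict.getD PySem.Dict.get?
  rw [hR, List.find?_map]
  cases hf : List.find? (fun p => p.1 == e) s.items with
  | none =>
      rw [show List.find? ((fun (p : String × (List String × List Int)) => p.1 == e) ∘ pvG) s.items
          = List.find? (fun p => p.1 == e) s.items from rfl, hf]
      rfl
  | some p =>
      rw [show List.find? ((fun (p : String × (List String × List Int)) => p.1 == e) ∘ pvG) s.items
          = List.find? (fun p => p.1 == e) s.items from rfl, hf]
      rfl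

theorem pvRelInsert (d : PySem.Dict String (List String × List Int))
    (s : PySem.Dict String (List (List String) × List Int))
    (hR : d.items = s.items.map pvG) (e : String)
    (vA : List String × List Int) (vB : List (List String) × List Int)
    (hv : vA = pvJoinVal vB) :
    (d.insert e vA).items = ((s.insert e vB).items).map pvG := by
  unfold PySem.Dict.insert
  rw [pvRelContains d s hR e]
  cases hc : s.contains e with
  | false =>
      simp only [Bool.false_eq_true, if_false]
      show d.items ++ [(e, vA)] = (s.items ++ [(e, vB)]).map pvG
      rw [hR, List.map_append]
      congr 1
      simp [pvG, hv]
  | true =>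
      simp only [if_true]
      show d.items.map _ = (s.items.map _).map pvG
      rw [hR, List.map_map, List.map_map]
      apply List.map_congr_left
      intro p _
      by_cases hpe : p.1 = e <;> simp [Function.comp, pvG, hpe, hv]

-- nonempty-sublists invariant on B's dict values
def pvNE (s : PySem.Dict String (List (List String) × List Int)) : Prop :=
  ∀ p ∈ s.items, [] ∉ p.2.1

theorem pvNEGetD (s : PySem.Dict String (List (List String) × List Int)) (hN : pvNE s)
    (e : String) : [] ∉ (s.getD e ([], [])).1 := by
  unfold PySem.Dict.getD PySem.Dict.get?
  cases hf : List.find? (fun p => p.1 == e) s.items with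
  | none => simp
  | some p =>
      simp only [Option.map_some, Option.getD_some]
      exact hN p (List.mem_of_find?_eq_some hf)

theorem pvNEInsert (s : PySem.Dict String (List (List String) × List Int)) (hN : pvNE s)
    (e : String) (vB : List (List String) × List Int) (hv : [] ∉ vB.1) :
    pvNE (s.insert e vB) := by
  intro p hp
  unfold PySem.Dict.insert at hp
  cases hc : s.contains e
  · simp only [hc, Bool.false_eq_true, if_false] at hp
    rcases List.mem_append.mp hp with hp | hp
    · exact hN p hp
    · simp only [List.mem_singleton] at hp; subst hp; exact hv
  · simp only [hc, if_true] at hp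
    rcases List.mem_map.mp hp with ⟨q, hq, hqp⟩
    by_cases hqe : q.1 = e
    · rw [if_pos (by simpa using hqe)] at hqp; subst hqp; exact hv
    · rw [if_neg (by simpa using hqe)] at hqp; subst hqp; exact hN q hq

theorem pvNEAppendLast (xss : List (List String)) (tok : String) (h : [] ∉ xss) :
    [] ∉ pvAppendLast xss tok := by
  unfold pvAppendLast
  cases hx : xss.isEmpty
  · simp only [Bool.false_eq_true, if_false]
    intro hmem
    rcases List.mem_append.mp hmem with hm | hm
    · exact h (List.dropLast_subset _ hm)
    · simp at hm
  · simpa [hx] using h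

theorem pvStepNE (bannedB : List String)
    (st : PySem.Dict String (List (List String) × List Int) × Int) (p : String × String)
    (hN : pvNE st.1) : pvNE (pvStepB bannedB st p).1 := by
  simp only [pvStepB]
  cases hc : (!(p.2 == "O") && !(bannedB.contains (PySem.Str.slice p.2 (some 2) none)))
  · simp only [Bool.false_eq_true, if_false]
    exact hN
  · simp only [if_true]
    have hN1 : pvNE (if st.1.contains (PySem.Str.slice p.2 (some 2) none) = true then st.1
        else st.1.insert (PySem.Str.slice p.2 (some 2) none) ([], [])) := by
      cases hcc : st.1.contains (PySem.Str.slice p.2 (some 2) none)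
      · simp only [hcc, Bool.false_eq_true, if_false]
        exact pvNEInsert st.1 hN _ ([], []) (by simp)
      · simpa [hcc] using hN
    cases hBW : PySem.Str.startswith p.2 "B-"
    · cases hIW : PySem.Str.startswith p.2 "I-"
      · simpa using hN1
      · simp only [Bool.false_eq_true, if_false, if_true, PySem.Dict.modify]
        apply pvNEInsert _ hN1
        exact pvNEAppendLast _ _ (pvNEGetD _ hN1 _)
    · simp only [if_true, PySem.Dict.modify]
      apply pvNEInsert _ hN1
      intro hmem
      rcases List.mem_append.mp hmem with hm | hm
      · exact pvNEGetD _ hN1 _ hm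
      · simp at hm

theorem pvStepItems (tokens l bannedA bannedB : List String)
    (hb : ∀ e, bannedB.contains e = bannedA.contains e) (i : Nat)
    (hi : i < l.length) (hlen : l.length ≤ tokens.length)
    (d : PySem.Dict String (List String × List Int))
    (s : PySem.Dict String (List (List String) × List Int))
    (hR : d.items = s.items.map pvG) (hN : pvNE s) :
    (pvStepA tokens l bannedA d (i : Int)).items
      = ((pvStepB bannedB (s, pvS tokens i) (tokens[i]'(by omega), l[i])).1).items.map pvG := by
  have hit : i < tokens.length := by omega
  have htok : PySem.List.pyGetD tokens (i : Int) "" = tokens[i]'hit := by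
    rw [PySem.List.pyGetD_eq_getElem tokens "" (by positivity) (by exact_mod_cast hit)]
    simp
  have hlab : PySem.List.pyGetD l (i : Int) "" = l[i] := by
    rw [PySem.List.pyGetD_eq_getElem l "" (by positivity) (by exact_mod_cast hi)]
    simp
  simp only [pvStepA, pvStepB, htok, hlab, pvStart_eq tokens i (le_of_lt hit)]
  cases hO : (l[i] == "O") <;>
    cases hB : bannedA.contains (PySem.Str.slice l[i] (some 2) none)
  case false.false =>
    rw [hb, hB]
    simp only [Bool.or_self, Bool.not_false, Bool.and_self, Bool.false_eq_true, if_false, if_true]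
    rw [pvRelContains d s hR]
    have hR1 : (if s.contains (PySem.Str.slice l[i] (some 2) none) = true then d
          else d.insert (PySem.Str.slice l[i] (some 2) none) ([], [])).items
        = ((if s.contains (PySem.Str.slice l[i] (some 2) none) = true then s
          else s.insert (PySem.Str.slice l[i] (some 2) none) ([], [])).items).map pvG := by
      cases hcc : s.contains (PySem.Str.slice l[i] (some 2) none)
      · simp only [hcc, Bool.false_eq_true, if_false]
        exact pvRelInsert d s hR _ ([], []) ([], []) rfl
      · simpa [hcc] using hR
    have hN1 : pvNE (if s.contains (PySem.Str.slice l[i] (some 2) none) = true then s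
        else s.insert (PySem.Str.slice l[i] (some 2) none) ([], [])) := by
      cases hcc : s.contains (PySem.Str.slice l[i] (some 2) none)
      · simp only [hcc, Bool.false_eq_true, if_false]
        exact pvNEInsert s hN _ ([], []) (by simp)
      · simpa [hcc] using hN
    cases hBW : PySem.Str.startswith l[i] "B-"
    · cases hIW : PySem.Str.startswith l[i] "I-"
      · simpa using hR1
      · simp only [Bool.false_eq_true, if_false, if_true, PySem.Dict.modify]
        apply pvRelInsert _ _ hR1
        rw [pvRelGetD _ _ hR1]
        unfold pvJoinVal
        rw [pvAppendCompat _ _ (pvNEGetD _ hN1 _)]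
    · simp only [if_true, PySem.Dict.modify]
      apply pvRelInsert _ _ hR1
      rw [pvRelGetD _ _ hR1]
      unfold pvJoinVal
      simp [pvJoinSingleton]
  case false.true =>
    rw [hb, hB]
    simpa using hR
  case true.false =>
    rw [hb, hB]
    simpa using hR
  case true.true =>
    rw [hb, hB]
    simpa using hR

theorem pvLoop_eq (tokens l bannedA bannedB : List String)
    (hb : ∀ e, bannedB.contains e = bannedA.contains e) (hlen : l.length ≤ tokens.length) :
    ∀ (k i : Nat), i + k = l.length →
    ∀ (d : PySem.Dict String (List String × List Int))
      (s : PySem.Dict String (List (List String) × List Int)),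
      d.items = s.items.map pvG → pvNE s →
    ((List.range' i k).foldl (fun ad (j : Nat) => pvStepA tokens l bannedA ad (j : Int)) d).items
      = ((((tokens.drop i).zip (l.drop i)).foldl (pvStepB bannedB) (s, pvS tokens i)).1).items.map pvG := by
  intro k
  induction k with
  | zero =>
      intro i hik d s hR hN
      have hdrop : l.drop i = [] := by
        apply List.drop_eq_nil_of_le; omega
      simpa [hdrop] using hR
  | succ k ih =>
      intro i hik d s hR hN
      have hi : i < l.length := by omega
      have hit : i < tokens.length := by omega
      rw [List.range'_succ]
      rw [← List.getElem_cons_drop hi, ← List.getElem_cons_drop hit]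
      simp only [List.zip_cons_cons, List.foldl_cons]
      have hoff : (pvStepB bannedB (s, pvS tokens i) (tokens[i]'hit, l[i])).2 = pvS tokens (i + 1) := by
        show pvS tokens i + PySem.Str.len (tokens[i]'hit) + 1 = pvS tokens (i + 1)
        rw [pvS_succ tokens i hit]
      have hpair : pvStepB bannedB (s, pvS tokens i) (tokens[i]'hit, l[i])
          = ((pvStepB bannedB (s, pvS tokens i) (tokens[i]'hit, l[i])).1, pvS tokens (i + 1)) := by
        rw [← hoff]
      rw [hpair]
      exact ih (i + 1) (by omega) _ _
        (pvStepItems tokens l bannedA bannedB hb i hi hlen d s hR hN)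
        (pvStepNE bannedB (s, pvS tokens i) (tokens[i]'hit, l[i]) hN)

theorem pvRemoveFold (items : List (String × (List String × List Int))) :
    ∀ (poss : List String), poss.Nodup →
    items.foldl (fun poss item =>
        if poss.contains item.1 then (PySem.List.remove? poss item.1).getD poss else poss) poss
      = poss.filter (fun e => !((items.map Prod.fst).contains e)) := by
  induction items with
  | nil => intro poss _; simp
  | cons it rest ih =>
      intro poss hnd
      have hstep : (if poss.contains it.1 then (PySem.List.remove? poss it.1).getD poss else poss)
          = poss.filter (fun x => x != it.1) := by
        by_cases hmem : it.1 ∈ poss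
        · rw [if_pos (by simpa using hmem), PySem.List.remove?_eq_some_erase poss it.1 hmem]
          simp [hnd.erase_eq_filter]
        · rw [if_neg (by simpa using hmem)]
          exact (List.filter_eq_self.mpr (fun a ha => by
            simp only [bne_iff_ne, ne_eq]
            exact fun hEq => hmem (hEq ▸ ha))).symm
      rw [List.foldl_cons, hstep, ih _ (hnd.filter _), List.filter_filter]
      apply List.filter_congr
      intro x hx
      simp only [List.map_cons, List.contains_cons, Bool.not_or, bne]
      rw [Bool.and_comm]

theorem pvMain (tokens : List String) (mapper : List (String × String))
    (labels : Option (List String)) (hpre : Pre_bioToSquad tokens mapper labels) :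
    bioToSquad tokens mapper labels = bioToSquad_alt tokens mapper labels := by
  obtain ⟨hlen, -⟩ := hpre
  have hnd : (PySem.Dict.ofList mapper).keys.Nodup := PySem.Dict.nodup_keys_ofList mapper
  -- A's emission fold, for any items list
  have emit : ∀ (its : List (String × (List String × List Int))),
      (its.foldl (fun st (item : String × (List String × List Int)) =>
          (if st.1.contains item.1 then (PySem.List.remove? st.1 item.1).getD st.1 else st.1,
           if (PySem.Dict.ofList mapper).contains item.1 then
             st.2 ++ [((PySem.Str.join " " tokens, (PySem.Dict.ofList mapper).getD item.1 ""), (item.2.1, item.2.2), item.1)]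
           else st.2)) ((PySem.Dict.ofList mapper).keys, [])) =
      ((PySem.Dict.ofList mapper).keys.filter (fun e => !((its.map Prod.fst).contains e)),
       (its.filter (fun p => (PySem.Dict.ofList mapper).contains p.1)).map
         (fun p => ((PySem.Str.join " " tokens, (PySem.Dict.ofList mapper).getD p.1 ""), (p.2.1, p.2.2), p.1))) := by
    intro its
    have h1 := PySem.List.foldl_prod_mk
      (f := fun poss (item : String × (List String × List Int)) =>
        if poss.contains item.1 then (PySem.List.remove? poss item.1).getD poss else poss)
      (g := fun sq (item : String × (List String × List Int)) =>
        if (PySem.Dict.ofList mapper).contains item.1 then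
          sq ++ [((PySem.Str.join " " tokens, (PySem.Dict.ofList mapper).getD item.1 ""), (item.2.1, item.2.2), item.1)]
        else sq)
      its ((PySem.Dict.ofList mapper).keys) []
    simp only [] at h1
    rw [h1]
    rw [pvRemoveFold its _ hnd]
    rw [PySem.List.foldl_append_if
      (p := fun (item : String × (List String × List Int)) => (PySem.Dict.ofList mapper).contains item.1)
      (f := fun (item : String × (List String × List Int)) =>
        ((PySem.Str.join " " tokens, (PySem.Dict.ofList mapper).getD item.1 ""), (item.2.1, item.2.2), item.1))]
    simp only [List.nil_append]
  cases labels with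
  | none =>
      simp only [bioToSquad, bioToSquad_alt]
      rw [PySem.List.foldl_append_singleton_eq_map]
      simp [PySem.Dict.contains_empty, List.filter_true,
        show (PySem.Dict.empty : PySem.Dict String (List (List String) × List Int)).items = [] from rfl]
  | some l =>
      by_cases hl : l.isEmpty
      · simp only [bioToSquad, bioToSquad_alt, hl, if_pos]
        rw [PySem.List.foldl_append_singleton_eq_map]
        simp [PySem.Dict.contains_empty, List.filter_true,
          show (PySem.Dict.empty : PySem.Dict String (List (List String) × List Int)).items = [] from rfl]
      · simp only [bioToSquad, bioToSquad_alt, hl, Bool.false_eq_true, if_false]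
        have hlen' : l.length ≤ tokens.length := by simpa using hlen
        have hb : ∀ e, (pvBannedSet l).contains e = (pvBanned l).contains e := by
          intro e
          simp [pvBannedSet, List.contains_eq_mem, PySem.Set.mem_ofList]
        have hfold : ((PySem.List.pyRange 0 (l.length : Int) 1).foldl
              (pvStepA tokens l (pvBanned l)) PySem.Dict.empty).items
            = ((((tokens.zip l).foldl (pvStepB (pvBannedSet l)) (PySem.Dict.empty, 0)).1).items).map pvG := by
          rw [PySem.List.pyRange_one, List.foldl_map]
          simp only [zero_add, sub_zero, Int.toNat_natCast]
          rw [List.range_eq_range']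
          have h0 : pvS tokens 0 = 0 := by simp [pvS]
          have hle := pvLoop_eq tokens l (pvBanned l) (pvBannedSet l) hb hlen' l.length 0 (by omega)
            PySem.Dict.empty PySem.Dict.empty (by rfl) (by intro p hp; exact absurd (show p ∈ ([] : List (String × (List (List String) × List Int))) from hp) List.not_mem_nil)
          simp only [List.drop_zero, h0] at hle
          exact hle
        rw [hfold, emit]
        rw [PySem.List.foldl_append_singleton_eq_map]
        simp only [List.filter_map, List.map_map]
        congr 1
        · -- negative entries: same keys filtered
          congr 1
          apply List.filter_congr
          intro k hk
          congr 1
          rw [PySem.Dict.contains_eq_decide_mem_keys]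
          simp only [PySem.Dict.keys]
          rw [List.contains_eq_mem]
          rfl

-- ===== VERDICT (by name: the statement is the Claim_ definition above) =====
theorem bioToSquad_spec : Claim_equal_bioToSquad := by
  unfold Claim_equal_bioToSquad
  intro tokens mapper labels _ hpre
  unfold Spec_bioToSquad
  exact pvMain tokens mapper labels hpre
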